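-- pv_equiv track=rewrite | github.com/manjari19/polygotplay | python/voice_convo.py | is_confusion_phrase
-- ===== SOURCE A (Python) =====
-- def is_confusion_phrase(user_input: str) -> bool:
--     """Check if the user input indicates confusion."""
--     confusion_phrases = [
--         "i don't understand",
--         "i dont understand",
--         "what does that mean",
--         "what do you mean",
--         "can you repeat",
--         "can you say that again",
--         "sorry",
--         "pardon",
--         "what",
--         "huh",
--         "come again",
--         "say again",
--         "repeat",
--         "explain",
--         "clarify"
--     ]
--
--     # Check if any confusion phrase is in the user input
--     for phrase in confusion_phrases:
--         if phrase in user_input: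
--             return True
--
--     return False
-- ===== SOURCE B (Python) =====
-- import re
--
-- _CONFUSION_PHRASES = [
--     "i don't understand",
--     "i dont understand",
--     "what does that mean",
--     "what do you mean",
--     "can you repeat",
--     "can you say that again",
--     "sorry",
--     "pardon",
--     "what",
--     "huh",
--     "come again",
--     "say again",
--     "repeat",
--     "explain",
--     "clarify",
-- ]
--
-- _CONFUSION_RE = re.compile("|".join(map(re.escape, _CONFUSION_PHRASES)))
--
--
-- def is_confusion_phrase(user_input: str) -> bool:
--     """Check if the user input indicates confusion."""
--     return _CONFUSION_RE.search(user_input) is not None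
-- ===== Notes on version B (the rewrite author's own statement) =====
-- stated objective: idiomatic
-- what changed: B precompiles the phrase list into a single alternation regex (re.escape keeps matching literal) and answers with one re.search pass over the input, replacing A's explicit per-phrase substring loop.
import Mathlib
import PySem

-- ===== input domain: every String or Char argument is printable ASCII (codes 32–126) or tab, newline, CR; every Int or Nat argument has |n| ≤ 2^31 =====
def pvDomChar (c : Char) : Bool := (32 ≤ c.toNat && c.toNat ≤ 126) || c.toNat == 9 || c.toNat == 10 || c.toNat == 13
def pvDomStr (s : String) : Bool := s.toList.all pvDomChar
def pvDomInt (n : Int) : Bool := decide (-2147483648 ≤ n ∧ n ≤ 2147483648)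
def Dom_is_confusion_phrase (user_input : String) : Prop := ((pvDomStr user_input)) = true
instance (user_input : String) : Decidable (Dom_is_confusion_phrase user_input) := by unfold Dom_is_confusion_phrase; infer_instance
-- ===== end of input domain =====

-- B compiles the phrase list into one alternation regex and answers with a single
-- re.search pass (position by position, alternatives in order) instead of A's
-- per-phrase substring loop; objective: idiomatic.

-- ===== PORT A =====
def pvPhrasesA : List String := [
  "i don't understand",
  "i dont understand",
  "what does that mean",
  "what do you mean",
  "can you repeat",
  "can you say that again",
  "sorry",
  "pardon",
  "what",
  "huh",
  "come again",
  "say again",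
  "repeat",
  "explain",
  "clarify"]

def pvALoop (s : String) : List String → Bool
  | [] => false
  | p :: ps => if PySem.Str.isIn p s then true else pvALoop s ps

def is_confusion_phrase (user_input : String) : Bool :=
  pvALoop user_input pvPhrasesA

-- ===== PORT B =====
-- re.search of the escaped alternation: scan start positions left to right; at each
-- position try the alternatives (literal phrases) in list order as prefixes of the
-- remaining suffix. This is exactly the regex engine's semantics for that pattern.
def pvReSearch : List Char → Bool
  | [] => pvPhrasesA.any (fun p => PySem.Chars.startswith [] p.toList)
  | c :: rest =>
      pvPhrasesA.any (fun p => PySem.Chars.startswith (c :: rest) p.toList) || pvReSearch rest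

def is_confusion_phrase_alt (user_input : String) : Bool :=
  pvReSearch user_input.toList

-- ===== PRECONDITION & SPEC =====
def Spec_is_confusion_phrase (user_input : String) (out : Bool) : Prop := out = is_confusion_phrase_alt user_input
instance (user_input : String) (out : Bool) : Decidable (Spec_is_confusion_phrase user_input out) := by unfold Spec_is_confusion_phrase; infer_instance

-- ===== CLAIM (what is proved, stated in full; the proofs are below) =====
def Claim_equal_is_confusion_phrase : Prop := ∀ (user_input : String), Dom_is_confusion_phrase user_input → Spec_is_confusion_phrase user_input (is_confusion_phrase user_input)

-- ===== LEMMAS AND PROOFS =====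

theorem pvALoop_iff (s : String) (ps : List String) :
    pvALoop s ps = true ↔ ∃ p ∈ ps, p.toList <:+: s.toList := by
  induction ps with
  | nil => simp [pvALoop]
  | cons p ps ih =>
    simp only [pvALoop, List.mem_cons]
    split_ifs with h
    · simp only [true_iff]
      exact ⟨p, Or.inl rfl, (PySem.Str.isIn_iff_infix p s).1 h⟩
    · rw [ih]
      constructor
      · rintro ⟨q, hq, hinf⟩; exact ⟨q, Or.inr hq, hinf⟩
      · rintro ⟨q, hq | hq, hinf⟩
        · subst hq; exact absurd ((PySem.Str.isIn_iff_infix q s).2 hinf) h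
        · exact ⟨q, hq, hinf⟩

theorem pvReSearch_iff (cs : List Char) :
    pvReSearch cs = true ↔ ∃ p ∈ pvPhrasesA, p.toList <:+: cs := by
  induction cs with
  | nil =>
    simp only [pvReSearch, List.any_eq_true, PySem.Chars.startswith_iff]
    constructor
    · rintro ⟨p, hp, hpre⟩; exact ⟨p, hp, hpre.isInfix⟩
    · rintro ⟨p, hp, hinf⟩
      exact ⟨p, hp, by simp [List.infix_nil.1 hinf]⟩
  | cons c rest ih =>
    simp only [pvReSearch, Bool.or_eq_true, List.any_eq_true, PySem.Chars.startswith_iff, ih]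
    constructor
    · rintro (⟨p, hp, hpre⟩ | ⟨p, hp, hinf⟩)
      · exact ⟨p, hp, hpre.isInfix⟩
      · exact ⟨p, hp, hinf.trans (List.suffix_cons c rest).isInfix⟩
    · rintro ⟨p, hp, hinf⟩
      rcases List.infix_iff_prefix_suffix.1 hinf with ⟨t, hpre, hsuf⟩
      rcases List.suffix_cons_iff.1 hsuf with h | h
      · subst h; exact Or.inl ⟨p, hp, hpre⟩
      · exact Or.inr ⟨p, hp, List.infix_iff_prefix_suffix.2 ⟨t, hpre, h⟩⟩

-- ===== VERDICT (by name: the statement is the Claim_ definition above) =====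
theorem is_confusion_phrase_spec : Claim_equal_is_confusion_phrase := by
  intro u _
  unfold Spec_is_confusion_phrase is_confusion_phrase is_confusion_phrase_alt
  rcases hb : pvReSearch u.toList with _ | _
  · rcases ha : pvALoop u pvPhrasesA with _ | _
    · rfl
    · exact absurd ((pvReSearch_iff _).2 ((pvALoop_iff _ _).1 ha)) (by simp [hb])
  · exact (pvALoop_iff _ _).2 ((pvReSearch_iff _).1 hb)
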